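-- pv_equiv track=rewrite | github.com/Garry-82/Module-2 | HomeWork4 (Final).py | podbor_key
-- ===== SOURCE A (Python) =====
-- def podbor_key(a):  #  функция вывода ключа ля заданного числа
--     key = ""
--     for i in range(1, a):
--         for j in range(i + 1, a):
--             sum_ = i + j
--             if a % sum_ == 0:
--                 key = key + str(i) + str(j)
--     return key
-- ===== SOURCE B (Python) =====
-- def podbor_key(a):
--     # precompute the divisors of a once; only sums that divide a contribute
--     divisors = [d for d in range(1, a + 1) if a % d == 0]
--     key = ""
--     for i in range(1, a):
--         for d in divisors:
--             j = d - i
--             if i < j and j < a: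
--                 key = key + str(i) + str(j)
--     return key
-- ===== Notes on version B (the rewrite author's own statement) =====
-- stated objective: faster
-- what changed: B precomputes the divisors of a once and, for each i, scans only the divisors (taking j = d - i with bounds checks) instead of testing every pair (i, j) with an inner O(a) loop.
import Mathlib
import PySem

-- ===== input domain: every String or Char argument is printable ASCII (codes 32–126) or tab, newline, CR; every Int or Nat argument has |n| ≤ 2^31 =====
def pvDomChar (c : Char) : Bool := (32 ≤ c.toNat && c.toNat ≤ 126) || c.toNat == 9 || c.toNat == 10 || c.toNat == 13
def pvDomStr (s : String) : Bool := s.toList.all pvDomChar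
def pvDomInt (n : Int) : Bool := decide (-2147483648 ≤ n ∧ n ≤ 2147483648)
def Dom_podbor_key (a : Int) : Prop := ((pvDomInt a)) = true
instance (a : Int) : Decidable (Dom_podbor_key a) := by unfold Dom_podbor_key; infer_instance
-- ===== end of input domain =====

-- B precomputes the divisors of a once and scans only those per i (j = d - i), instead of A's O(a) inner loop per i.

-- ===== PORT A =====
def podbor_key (a : Int) : String :=
  (PySem.List.pyRange 1 a 1).foldl (fun key i =>
    (PySem.List.pyRange (i + 1) a 1).foldl (fun key j =>
      let sum_ := i + j
      if PySem.Int.mod a sum_ = 0 then key ++ PySem.Int.toStr i ++ PySem.Int.toStr j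
      else key) key) ""

-- ===== PORT B =====
def podbor_key_alt (a : Int) : String :=
  let divisors := (PySem.List.pyRange 1 (a + 1) 1).filter (fun d => PySem.Int.mod a d == 0)
  (PySem.List.pyRange 1 a 1).foldl (fun key i =>
    divisors.foldl (fun key d =>
      let j := d - i
      if i < j ∧ j < a then key ++ PySem.Int.toStr i ++ PySem.Int.toStr j
      else key) key) ""

-- ===== PRECONDITION & SPEC =====
def Spec_podbor_key (a : Int) (out : String) : Prop := out = podbor_key_alt a
instance (a : Int) (out : String) : Decidable (Spec_podbor_key a out) := by unfold Spec_podbor_key; infer_instance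

-- ===== CLAIM (what is proved, stated in full; the proofs are below) =====
def Claim_equal_podbor_key : Prop := ∀ (a : Int), Dom_podbor_key a → Spec_podbor_key a (podbor_key a)

-- ===== LEMMAS AND PROOFS =====

-- list of j's A appends for a given i
def pvLA (a i : Int) : List Int :=
  (PySem.List.pyRange (i + 1) a 1).filter (fun j => decide (PySem.Int.mod a (i + j) = 0))

-- list of d's B appends for a given i
def pvLB (a i : Int) : List Int :=
  ((PySem.List.pyRange 1 (a + 1) 1).filter (fun d => PySem.Int.mod a d == 0)).filter
    (fun d => decide (i < d - i ∧ d - i < a))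

lemma foldl_if_filter {α β : Type} (p : α → Prop) [DecidablePred p] (g : β → α → β) :
    ∀ (l : List α) (init : β),
      l.foldl (fun s x => if p x then g s x else s) init
        = (l.filter (fun x => decide (p x))).foldl g init := by
  intro l
  induction l with
  | nil => intro init; rfl
  | cons x xs ih =>
    intro init
    by_cases h : p x <;> simp [h, ih]

lemma pvLB_eq_map (a i : Int) (hi : 1 ≤ i) (hia : i < a) :
    pvLB a i = (pvLA a i).map (fun j => i + j) := by
  have ha : 0 < a := by omega
  have hsortB : (pvLB a i).Pairwise (· < ·) := by
    unfold pvLB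
    exact ((PySem.List.pairwise_lt_pyRange_one 1 (a + 1)).filter _).filter _
  have hsortA : ((pvLA a i).map (fun j => i + j)).Pairwise (· < ·) := by
    have h0 : (pvLA a i).Pairwise (· < ·) := by
      unfold pvLA
      exact (PySem.List.pairwise_lt_pyRange_one (i + 1) a).filter _
    exact List.pairwise_map.mpr (h0.imp (fun h => by omega))
  have hmem : ∀ x, x ∈ pvLB a i ↔ x ∈ (pvLA a i).map (fun j => i + j) := by
    intro x
    simp only [pvLB, pvLA, List.mem_map, List.mem_filter,
      PySem.List.mem_pyRange_one, decide_eq_true_eq, beq_iff_eq]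
    constructor
    · rintro ⟨⟨⟨h1, h2⟩, hm⟩, h3, h4⟩
      refine ⟨x - i, ⟨⟨by omega, by omega⟩, ?_⟩, by omega⟩
      have : i + (x - i) = x := by omega
      rw [this]; exact hm
    · rintro ⟨j, ⟨⟨hj1, hj2⟩, hm⟩, rfl⟩
      refine ⟨⟨⟨by omega, ?_⟩, hm⟩, by omega, by omega⟩
      -- i + j ≤ a: otherwise a mod (i + j) = a ≠ 0
      by_contra h
      rw [PySem.Int.mod_eq_emod_of_pos (by omega)] at hm
      rw [Int.emod_eq_of_lt (by omega) (by omega)] at hm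
      omega
  have hnodB : (pvLB a i).Nodup := hsortB.imp (fun h => ne_of_lt h)
  have hnodA : ((pvLA a i).map (fun j => i + j)).Nodup := hsortA.imp (fun h => ne_of_lt h)
  have hperm : (pvLB a i).Perm ((pvLA a i).map (fun j => i + j)) :=
    (List.perm_ext_iff_of_nodup hnodB hnodA).mpr hmem
  exact hperm.eq_of_pairwise (fun x y _ _ h1 h2 => absurd h2 (lt_asymm h1)) hsortB hsortA

lemma inner_eq (a i : Int) (hi : 1 ≤ i) (hia : i < a) (key : String) :
    (PySem.List.pyRange (i + 1) a 1).foldl (fun key j =>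
        if PySem.Int.mod a (i + j) = 0 then key ++ PySem.Int.toStr i ++ PySem.Int.toStr j
        else key) key
      = ((PySem.List.pyRange 1 (a + 1) 1).filter (fun d => PySem.Int.mod a d == 0)).foldl
        (fun key d =>
          if i < d - i ∧ d - i < a then key ++ PySem.Int.toStr i ++ PySem.Int.toStr (d - i)
          else key) key := by
  rw [foldl_if_filter (fun j => PySem.Int.mod a (i + j) = 0)
        (fun key j => key ++ PySem.Int.toStr i ++ PySem.Int.toStr j),
      foldl_if_filter (fun d => i < d - i ∧ d - i < a)
        (fun key d => key ++ PySem.Int.toStr i ++ PySem.Int.toStr (d - i))]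
  rw [show (List.filter (fun d => decide (i < d - i ∧ d - i < a))
        ((PySem.List.pyRange 1 (a + 1) 1).filter (fun d => PySem.Int.mod a d == 0))) = pvLB a i
      from rfl,
      show (List.filter (fun j => decide (PySem.Int.mod a (i + j) = 0))
        (PySem.List.pyRange (i + 1) a 1)) = pvLA a i from rfl]
  rw [pvLB_eq_map a i hi hia, List.foldl_map]
  apply PySem.List.foldl_congr_mem
  intro acc x _
  have : i + x - i = x := by omega
  rw [this]

-- ===== VERDICT (by name: the statement is the Claim_ definition above) =====
theorem podbor_key_spec : Claim_equal_podbor_key := by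
  intro a _
  unfold Spec_podbor_key podbor_key podbor_key_alt
  apply PySem.List.foldl_congr_mem _; intro key i hi
  rw [PySem.List.mem_pyRange_one] at hi
  exact inner_eq a i hi.1 hi.2 key
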